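-- pv_equiv track=rewrite | github.com/jasmine-429/Factual-Inconsistency-in-Chart-Captioning-Error-Analysis-and-Two-Stage-Fine-Tuning-for-MLLMs | model/MMCA/fine-tuning/dataset/train_chartx_caption/script/trans_data.py | extract_user_and_assistant
-- ===== SOURCE A (Python) =====
-- def extract_user_and_assistant(messages):
--     user_text = ""
--     assistant_text = ""
--     for m in messages or []:
--         role = m.get("role", "")
--         content = m.get("content", "")
--         if role == "user" and not user_text:
--             user_text = content
--         elif role == "assistant" and not assistant_text:
--             assistant_text = content
--         if user_text and assistant_text:
--             break
--     return user_text, assistant_text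
-- ===== SOURCE B (Python) =====
-- def extract_user_and_assistant(messages):
--     msgs = messages or []
--     user_text = next((m.get("content", "") for m in msgs
--                       if m.get("role", "") == "user" and m.get("content", "")), "")
--     assistant_text = next((m.get("content", "") for m in msgs
--                            if m.get("role", "") == "assistant" and m.get("content", "")), "")
--     return user_text, assistant_text
-- ===== Notes on version B (the rewrite author's own statement) =====
-- stated objective: idiomatic
-- what changed: Replaces the single interleaved early-exit loop maintaining both slots with two independent next()-over-generator searches, one per role, each filtering on role and non-empty content.
import Mathlib
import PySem

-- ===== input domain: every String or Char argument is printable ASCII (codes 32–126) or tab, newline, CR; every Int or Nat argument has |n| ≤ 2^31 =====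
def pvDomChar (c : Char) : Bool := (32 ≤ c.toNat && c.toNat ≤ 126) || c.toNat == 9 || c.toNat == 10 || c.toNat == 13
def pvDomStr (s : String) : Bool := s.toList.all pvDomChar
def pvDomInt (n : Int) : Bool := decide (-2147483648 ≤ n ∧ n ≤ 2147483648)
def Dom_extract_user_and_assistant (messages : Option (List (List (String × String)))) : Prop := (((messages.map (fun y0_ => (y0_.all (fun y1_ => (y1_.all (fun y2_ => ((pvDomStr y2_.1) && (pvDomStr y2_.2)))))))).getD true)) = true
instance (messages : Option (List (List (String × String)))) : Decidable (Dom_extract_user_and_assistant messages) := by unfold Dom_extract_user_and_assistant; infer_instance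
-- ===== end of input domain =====

-- ===== PORT A =====
-- dict.get(k, dflt) on an association-list dict: first matching key, else the default (shared builtin helper)
def pvGetD (m : List (String × String)) (k dflt : String) : String :=
  match m.find? (fun p => p.1 = k) with
  | some p => p.2
  | none => dflt

-- A's single loop: maintains both slots, breaks once both are non-empty
def extractLoopA : List (List (String × String)) → String → String → String × String
  | [], u, a => (u, a)
  | m :: rest, u, a =>
    let role := pvGetD m "role" ""
    let content := pvGetD m "content" ""
    let p : String × String :=
      if role = "user" ∧ u = "" then (content, a)
      else if role = "assistant" ∧ a = "" then (u, content)
      else (u, a)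
    if p.1 ≠ "" ∧ p.2 ≠ "" then p else extractLoopA rest p.1 p.2

def extract_user_and_assistant (messages : Option (List (List (String × String)))) : String × String :=
  extractLoopA (messages.getD []) "" ""

-- ===== PORT B =====
-- B: first content of a message with the given role and non-empty content (the next()-generator search)
def pvFirstContent (role : String) : List (List (String × String)) → String
  | [] => ""
  | m :: rest =>
    if pvGetD m "role" "" = role ∧ pvGetD m "content" "" ≠ "" then pvGetD m "content" ""
    else pvFirstContent role rest

def extract_user_and_assistant_alt (messages : Option (List (List (String × String)))) : String × String :=
  let msgs := messages.getD []
  (pvFirstContent "user" msgs, pvFirstContent "assistant" msgs)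

-- ===== PRECONDITION & SPEC =====
def Spec_extract_user_and_assistant (messages : Option (List (List (String × String)))) (out : String × String) : Prop := out = extract_user_and_assistant_alt messages
instance (messages : Option (List (List (String × String)))) (out : String × String) : Decidable (Spec_extract_user_and_assistant messages out) := by unfold Spec_extract_user_and_assistant; infer_instance

-- ===== CLAIM (what is proved, stated in full; the proofs are below) =====
def Claim_equal_extract_user_and_assistant : Prop := ∀ (messages : Option (List (List (String × String)))), Dom_extract_user_and_assistant messages → Spec_extract_user_and_assistant messages (extract_user_and_assistant messages)

-- ===== LEMMAS AND PROOFS =====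

lemma extractLoopA_eq (msgs : List (List (String × String))) :
    ∀ u a, extractLoopA msgs u a =
      ((if u = "" then pvFirstContent "user" msgs else u),
       (if a = "" then pvFirstContent "assistant" msgs else a)) := by
  induction msgs with
  | nil => intro u a; simp [extractLoopA, pvFirstContent]
  | cons m rest ih =>
    intro u a
    simp only [extractLoopA, pvFirstContent]
    by_cases hu : u = "" <;> by_cases ha : a = "" <;>
      by_cases hru : pvGetD m "role" "" = "user" <;>
      by_cases hra : pvGetD m "role" "" = "assistant" <;>
      by_cases hc : pvGetD m "content" "" = "" <;>
      simp_all [ih]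

-- ===== VERDICT (by name: the statement is the Claim_ definition above) =====
theorem extract_user_and_assistant_spec : Claim_equal_extract_user_and_assistant := by
  intro messages _
  unfold Spec_extract_user_and_assistant extract_user_and_assistant extract_user_and_assistant_alt
  simp [extractLoopA_eq]
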